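-- pv_equiv track=rewrite | github.com/MoJIoToK/Python | 6S_HW/Task1.py | Sum_Number
-- ===== SOURCE A (Python) =====
-- def Sum_Number(list_1):
--     list_result = []
--     sum = 0
--     for i, element in enumerate(list_1):
--         if i % 2 != 0:
--             sum += element
--             list_result.append(element)
--     return sum, list_result
-- ===== SOURCE B (Python) =====
-- def Sum_Number(list_1):
--     list_result = list(list_1[1::2])
--     return sum(list_result), list_result
-- ===== Notes on version B (the rewrite author's own statement) =====
-- stated objective: simpler
-- what changed: The enumerate loop with a parity branch and two accumulators is replaced by a stride slice list_1[1::2] that selects the odd-indexed elements directly, plus sum() over it.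
import Mathlib
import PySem

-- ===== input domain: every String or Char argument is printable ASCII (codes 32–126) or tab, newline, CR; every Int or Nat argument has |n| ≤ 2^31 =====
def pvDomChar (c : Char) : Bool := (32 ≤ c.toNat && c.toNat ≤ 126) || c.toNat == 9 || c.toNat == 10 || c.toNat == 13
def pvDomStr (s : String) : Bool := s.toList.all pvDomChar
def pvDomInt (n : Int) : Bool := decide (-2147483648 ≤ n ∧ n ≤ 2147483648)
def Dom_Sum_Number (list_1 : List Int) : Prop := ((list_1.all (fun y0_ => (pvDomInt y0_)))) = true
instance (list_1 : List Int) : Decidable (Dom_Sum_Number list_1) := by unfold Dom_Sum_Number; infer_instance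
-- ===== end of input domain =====

-- B replaces A's enumerate loop with a parity branch by a stride slice list_1[1::2] plus sum(); objective: simpler.

-- ===== PORT A =====
-- A: loop over enumerate(list_1), keeping the running sum and the collected list.
def Sum_Number (list_1 : List Int) : Int × List Int :=
  let st := (PySem.List.enumerate list_1 0).foldl
    (fun (acc : Int × List Int) p =>
      if PySem.Int.mod p.1 2 ≠ 0 then (acc.1 + p.2, acc.2 ++ [p.2]) else acc)
    (0, [])
  (st.1, st.2)

-- ===== PORT B =====
-- B: list_result = list(list_1[1::2]); return sum(list_result), list_result.
def Sum_Number_alt (list_1 : List Int) : Int × List Int :=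
  let list_result := (PySem.List.slice? list_1 (some 1) none 2).getD []
  (list_result.foldl (· + ·) 0, list_result)

-- ===== PRECONDITION & SPEC =====
def Spec_Sum_Number (list_1 : List Int) (out : Int × List Int) : Prop := out = Sum_Number_alt list_1
instance (list_1 : List Int) (out : Int × List Int) : Decidable (Spec_Sum_Number list_1 out) := by unfold Spec_Sum_Number; infer_instance

-- ===== CLAIM (what is proved, stated in full; the proofs are below) =====
def Claim_equal_Sum_Number : Prop := ∀ (list_1 : List Int), Dom_Sum_Number list_1 → Spec_Sum_Number list_1 (Sum_Number list_1)

-- ===== LEMMAS AND PROOFS =====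

-- the odd-indexed elements of a list, taken two at a time
def oddElems : List Int → List Int
  | [] => []
  | [_] => []
  | _ :: y :: t => y :: oddElems t

-- A's loop body, named for the lemmas
def stepA (acc : Int × List Int) (p : Int × Int) : Int × List Int :=
  if PySem.Int.mod p.1 2 ≠ 0 then (acc.1 + p.2, acc.2 ++ [p.2]) else acc

-- A's loop from any even start index collects exactly the odd-indexed elements and their sum
lemma fold_stepA (t : List Int) : ∀ (s sum0 : Int) (acc : List Int),
    s % 2 = 0 →
    (PySem.List.enumerate t s).foldl stepA (sum0, acc)
      = (sum0 + (oddElems t).sum, acc ++ oddElems t) := by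
  induction t using oddElems.induct with
  | case1 => intro s sum0 acc _; simp [PySem.List.enumerate, oddElems]
  | case2 x =>
    intro s sum0 acc hm
    have h1 : PySem.Int.mod s 2 = 0 := by
      simp [PySem.Int.mod, Int.fmod_eq_emod]; omega
    simp only [PySem.List.enumerate, List.foldl_cons, List.foldl_nil, stepA, h1, oddElems]
    simp
  | case3 x y t ih =>
    intro s sum0 acc hm
    have h1 : PySem.Int.mod s 2 = 0 := by
      simp [PySem.Int.mod, Int.fmod_eq_emod]; omega
    have h2 : PySem.Int.mod (s + 1) 2 = 1 := by
      simp [PySem.Int.mod, Int.fmod_eq_emod]; omega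
    rw [PySem.List.enumerate_cons, PySem.List.enumerate_cons]
    simp only [List.foldl_cons]
    rw [show stepA (sum0, acc) (s, x) = (sum0, acc) by simp only [stepA, h1]; simp,
        show stepA (sum0, acc) (s + 1, y) = (sum0 + y, acc ++ [y]) by simp only [stepA, h2]; simp,
        ih (s + 1 + 1) (sum0 + y) (acc ++ [y]) (by omega)]
    simp [oddElems]
    ring

-- B's index list range(len/2) at positions 1+2k is exactly oddElems
lemma filterMap_odd : ∀ t : List Int,
    (List.range (t.length / 2)).filterMap (fun (k : Nat) => t[((1:Int) + 2 * (k:Int)).toNat]?)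
      = oddElems t := by
  intro t
  induction t using oddElems.induct with
  | case1 => simp [oddElems]
  | case2 x => simp [oddElems]
  | case3 x y t ih =>
    have hlen : (x :: y :: t).length / 2 = t.length / 2 + 1 := by
      simp [List.length_cons]; omega
    have htail : List.filterMap ((fun (k : Nat) => (x :: y :: t)[((1:Int) + 2 * (k:Int)).toNat]?) ∘ Nat.succ)
        (List.range (t.length / 2))
        = List.filterMap (fun (k : Nat) => t[((1:Int) + 2 * (k:Int)).toNat]?) (List.range (t.length / 2)) := by
      apply List.filterMap_congr
      intro k _
      simp only [Function.comp_apply, Nat.succ_eq_add_one]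
      have e1 : ((1:Int) + 2 * ((k + 1 : Nat) : Int)).toNat = 1 + 2 * k + 1 + 1 := by push_cast; omega
      have e2 : ((1:Int) + 2 * ((k : Nat) : Int)).toNat = 1 + 2 * k := by omega
      rw [e1, e2]
      rfl
    have h0 : ((x :: y :: t)[((1:Int) + 2 * ((0:Nat):Int)).toNat]?) = some y := by
      norm_num
    rw [oddElems, hlen, List.range_succ_eq_map, List.filterMap_cons, List.filterMap_map, h0, htail, ih]

-- B's slice [1::2] is exactly oddElems
lemma slice_odd (xs : List Int) :
    (PySem.List.slice? xs (some 1) none 2).getD [] = oddElems xs := by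
  cases xs with
  | nil => simp [PySem.List.slice?, PySem.List.sliceIndices, oddElems]
  | cons x t =>
    have h1 : PySem.List.slice? (x :: t) (some 1) none 2
        = some ((List.range ((x :: t).length / 2)).filterMap
            (fun (k : Nat) => (x :: t)[((1:Int) + 2 * (k:Int)).toNat]?)) := by
      simp only [PySem.List.slice?, PySem.List.sliceIndices]
      norm_num
      have hc : (if 0 < t.length then (((t.length:Int) + 2 - 1) / 2).toNat else 0)
          = (x :: t).length / 2 := by
        simp [List.length_cons]
        split_ifs with h <;> omega
      rw [hc]
      simp [List.length_cons]
    rw [h1, Option.getD_some, filterMap_odd]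

-- ===== VERDICT (by name: the statement is the Claim_ definition above) =====
theorem Sum_Number_spec : Claim_equal_Sum_Number := by
  intro list_1 _
  unfold Spec_Sum_Number
  have hA : Sum_Number list_1 = ((oddElems list_1).sum, oddElems list_1) := by
    unfold Sum_Number
    rw [show (fun (acc : Int × List Int) p =>
          if PySem.Int.mod p.1 2 ≠ 0 then (acc.1 + p.2, acc.2 ++ [p.2]) else acc) = stepA from rfl,
        fold_stepA list_1 0 0 [] (by decide)]
    simp
  have hB : Sum_Number_alt list_1 = ((oddElems list_1).sum, oddElems list_1) := by
    unfold Sum_Number_alt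
    rw [slice_odd]
    simp only []
    rw [← List.sum_eq_foldl]
  rw [hA, hB]
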